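-- pv_equiv track=rewrite | github.com/Marco-Z/pyPoker | poker.py | limit_counts
-- ===== SOURCE A (Python) =====
-- def limit_counts(counts, n=5):
--     res = []
--     for c in counts:
--         if n - c > 0:
--             res += [c]
--             n -= c
--         elif n - c == 0:
--             return tuple(res + [c])
--         else:
--             return tuple(res + [n])
--     return tuple(res)
-- ===== SOURCE B (Python) =====
-- def limit_counts(counts, n=5):
--     # Two-phase: build prefix sums, then find the first crossing of the budget.
--     prefixes = []
--     s = 0
--     for c in counts:
--         s += c
--         prefixes.append(s)
--     for i, p in enumerate(prefixes):
--         if p == n: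
--             return tuple(counts[:i + 1])
--         if p > n:
--             return tuple(counts[:i] + [n - p + counts[i]])
--     return tuple(counts)
-- ===== Notes on version B (the rewrite author's own statement) =====
-- stated objective: alternative
-- what changed: Replaces A's single loop that mutates the budget and accumulates a result list with a two-phase prefix-sum algorithm: build the running sums once, scan for the first index whose prefix sum reaches the budget, and produce the answer by slicing the original list (appending the residual budget on overshoot).
import Mathlib
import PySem

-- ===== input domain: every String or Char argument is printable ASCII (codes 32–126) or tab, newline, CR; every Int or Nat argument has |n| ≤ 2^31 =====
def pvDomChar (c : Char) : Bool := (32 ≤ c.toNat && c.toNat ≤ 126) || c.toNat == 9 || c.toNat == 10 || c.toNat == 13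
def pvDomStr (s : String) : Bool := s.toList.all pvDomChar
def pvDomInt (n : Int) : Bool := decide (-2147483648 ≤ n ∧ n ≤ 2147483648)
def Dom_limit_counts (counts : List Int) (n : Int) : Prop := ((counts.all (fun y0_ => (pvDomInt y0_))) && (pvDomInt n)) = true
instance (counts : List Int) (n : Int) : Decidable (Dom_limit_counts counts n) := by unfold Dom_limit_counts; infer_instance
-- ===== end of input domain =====

-- B builds the prefix-sum list and slices at the first budget crossing, instead of A's
-- budget-mutating accumulator loop; same O(n) cost (objective: alternative decomposition).

-- ===== PORT A =====
-- the loop of A: state is (remaining budget n, accumulated res)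
def aLoop : List Int → Int → List Int → List Int
  | [], _, res => res
  | c :: cs, n, res =>
    if n - c > 0 then aLoop cs (n - c) (res ++ [c])
    else if n - c = 0 then res ++ [c]
    else res ++ [n]

def limit_counts (counts : List Int) (n : Int) : List Int :=
  aLoop counts n []

-- ===== PORT B =====
-- phase 1 of B: the running prefix sums of the list (s = sum so far)
def altPrefixes (s : Int) : List Int → List Int
  | [] => []
  | c :: cs => (s + c) :: altPrefixes (s + c) cs

-- phase 2 of B: first (index, prefix sum) with prefix sum ≥ n (Python: the `p == n` / `p > n` returns)
def altFind (n : Int) : List Int → Nat → Option (Nat × Int)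
  | [], _ => none
  | p :: ps, i => if p ≥ n then some (i, p) else altFind n ps (i + 1)

def limit_counts_alt (counts : List Int) (n : Int) : List Int :=
  match altFind n (altPrefixes 0 counts) 0 with
  | none => counts
  | some (i, p) =>
    if p = n then counts.take (i + 1)
    else counts.take i ++ [n - p + counts.getD i 0]

-- ===== PRECONDITION & SPEC =====
def Spec_limit_counts (counts : List Int) (n : Int) (out : List Int) : Prop := out = limit_counts_alt counts n
instance (counts : List Int) (n : Int) (out : List Int) : Decidable (Spec_limit_counts counts n out) := by unfold Spec_limit_counts; infer_instance

-- ===== CLAIM (what is proved, stated in full; the proofs are below) =====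
def Claim_equal_limit_counts : Prop := ∀ (counts : List Int) (n : Int), Dom_limit_counts counts n → Spec_limit_counts counts n (limit_counts counts n)

-- ===== LEMMAS AND PROOFS =====


lemma altPrefixes_shift (cs : List Int) : ∀ s t : Int, altPrefixes (s + t) cs = (altPrefixes s cs).map (· + t) := by
  induction cs with
  | nil => intro s t; simp [altPrefixes]
  | cons c cs ih =>
    intro s t
    simp only [altPrefixes, List.map_cons]
    rw [show s + t + c = s + c + t from by ring, ih (s + c) t]

lemma altFind_map_add (t : Int) (ps : List Int) : ∀ (n : Int) (i : Nat),
    altFind n (ps.map (· + t)) i = (altFind (n - t) ps i).map (fun x => (x.1, x.2 + t)) := by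
  induction ps with
  | nil => intro n i; simp [altFind]
  | cons p ps ih =>
    intro n i
    simp only [List.map_cons, altFind]
    by_cases h : p + t ≥ n
    · rw [if_pos h, if_pos (by omega)]; rfl
    · rw [if_neg h, if_neg (by omega)]; exact ih n (i + 1)

lemma altFind_shift (n : Int) (ps : List Int) : ∀ i : Nat,
    altFind n ps (i + 1) = (altFind n ps i).map (fun x => (x.1 + 1, x.2)) := by
  induction ps with
  | nil => intro i; simp [altFind]
  | cons p ps ih =>
    intro i
    simp only [altFind]
    by_cases h : p ≥ n
    · rw [if_pos h, if_pos h]; rfl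
    · rw [if_neg h, if_neg h]; exact ih (i + 1)

-- B satisfies the same head-step recurrence as A's loop body
lemma alt_cons (c : Int) (cs : List Int) (n : Int) :
    limit_counts_alt (c :: cs) n =
      if n - c > 0 then c :: limit_counts_alt cs (n - c)
      else if n - c = 0 then [c] else [n] := by
  simp only [limit_counts_alt, altPrefixes, zero_add]
  by_cases h1 : c ≥ n
  · have hf : altFind n (c :: altPrefixes c cs) 0 = some (0, c) := by
      simp [altFind, h1]
    rw [hf]
    by_cases h2 : c = n
    · subst h2; simp
    · rw [if_neg (show ¬ n - c > 0 by omega), if_neg (show ¬ n - c = 0 by omega)]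
      simp [h2]
  · have hf : altFind n (c :: altPrefixes c cs) 0 = altFind n (altPrefixes c cs) 1 := by
      simp [altFind, h1]
    rw [hf]
    have hp : altPrefixes c cs = (altPrefixes 0 cs).map (· + c) := by
      have := altPrefixes_shift cs 0 c; rwa [zero_add] at this
    rw [hp, altFind_map_add c (altPrefixes 0 cs) n 1, altFind_shift (n - c) (altPrefixes 0 cs) 0,
      if_pos (by omega : n - c > 0)]
    cases hfind : altFind (n - c) (altPrefixes 0 cs) 0 with
    | none => simp
    | some x =>
      obtain ⟨j, q⟩ := x
      simp only [Option.map_some]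
      by_cases h2 : q = n - c
      · rw [if_pos (by omega : q + c = n), if_pos h2, List.take_succ_cons]
      · rw [if_neg (by omega : ¬ q + c = n), if_neg h2, List.take_succ_cons]
        simp only [List.getD_cons_succ, List.cons_append]
        rw [show n - (q + c) + cs.getD j 0 = n - c - q + cs.getD j 0 from by ring]

lemma aLoop_eq_alt (cs : List Int) : ∀ (n : Int) (res : List Int),
    aLoop cs n res = res ++ limit_counts_alt cs n := by
  induction cs with
  | nil => intro n res; simp [aLoop, limit_counts_alt, altPrefixes, altFind]
  | cons c cs ih =>
    intro n res
    rw [alt_cons]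
    simp only [aLoop]
    by_cases h1 : n - c > 0
    · rw [if_pos h1, if_pos h1, ih (n - c) (res ++ [c])]; simp
    · rw [if_neg h1, if_neg h1]
      by_cases h2 : n - c = 0 <;> simp [h2]

-- ===== VERDICT (by name: the statement is the Claim_ definition above) =====
theorem limit_counts_spec : Claim_equal_limit_counts := by
  intro counts n _
  unfold Spec_limit_counts limit_counts
  rw [aLoop_eq_alt counts n []]
  simp
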